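-- pv_equiv track=rewrite | github.com/shinkeonkim/BOJ | 16000~16999/16900~16999/16969.py | solution
-- ===== SOURCE A (Python) =====
-- MOD = 1000000009
--
-- def solution(s):
--   ans = 10 if s[0] == 'd' else 26
--
--   for i in range(1, len(s)):
--     prev = s[i - 1]
--     crt = s[i]
--
--     if prev == crt:
--       ans *= 9 if crt == 'd' else 25
--     else:
--       ans *= 10 if crt == 'd' else 26
--
--     ans %= MOD
--
--   return ans
-- ===== SOURCE B (Python) =====
-- MOD = 1000000009
--
-- def solution(s):
--     # Group s into maximal runs of equal characters; a run of c with length L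
--     # contributes base * (base-1)^(L-1) where base = 10 for 'd' else 26.
--     ans = 1
--     i = 0
--     n = len(s)
--     while i < n:
--         j = i
--         while j < n and s[j] == s[i]:
--             j += 1
--         base = 10 if s[i] == 'd' else 26
--         ans = ans * base % MOD * pow(base - 1, j - i - 1, MOD) % MOD
--         i = j
--     return ans
-- ===== Notes on version B (the rewrite author's own statement) =====
-- stated objective: alternative
-- what changed: B groups the string into maximal runs of equal characters and multiplies base * (base-1)^(L-1) mod MOD per run (via modular pow), instead of A's loop that multiplies one factor per adjacent index pair; Pre_ excludes only the empty string, on which A raises IndexError (s[0]) while B returns 1.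
import Mathlib
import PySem

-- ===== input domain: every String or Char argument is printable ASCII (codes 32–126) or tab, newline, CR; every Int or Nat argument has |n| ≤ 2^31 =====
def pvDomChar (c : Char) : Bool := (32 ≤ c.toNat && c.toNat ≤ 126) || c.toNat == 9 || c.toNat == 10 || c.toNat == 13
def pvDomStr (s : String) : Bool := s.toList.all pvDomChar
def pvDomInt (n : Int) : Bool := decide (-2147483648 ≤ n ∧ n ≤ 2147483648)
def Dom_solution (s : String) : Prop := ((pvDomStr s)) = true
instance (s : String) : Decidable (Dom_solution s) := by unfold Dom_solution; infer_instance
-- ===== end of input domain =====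

-- B groups the string into maximal runs of equal characters and multiplies
-- base * (base-1)^(L-1) mod MOD per run, instead of A's per-adjacent-pair loop.
-- Objective: alternative decomposition (same asymptotic cost). On "" A raises
-- IndexError (excluded by Pre_); B returns 1.

-- ===== PORT A =====
def solution (s : String) : Int :=
  let cs := s.toList
  -- s[0]: IndexError on the empty string, excluded by Pre_solution
  let ans0 : Int := if PySem.List.pyGetD cs 0 ' ' = 'd' then 10 else 26
  (PySem.List.pyRange 1 (cs.length : Int) 1).foldl
    (fun ans i =>
      let prev := PySem.List.pyGetD cs (i - 1) ' '
      let crt := PySem.List.pyGetD cs i ' '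
      let ans := ans * (if prev = crt then (if crt = 'd' then (9 : Int) else 25)
                        else (if crt = 'd' then 10 else 26))
      PySem.Int.mod ans 1000000009)
    ans0

-- ===== PORT B =====
-- inner while loop: (length - 1) of the maximal run of c heading c :: t, plus the rest
def takeRun (c : Char) : List Char → Nat × List Char
  | [] => (0, [])
  | x :: t => if x = c then ((takeRun c t).1 + 1, (takeRun c t).2) else (0, x :: t)

-- outer while loop of B; fuel (= initial length) only makes the recursion structural
def altGo (fuel : Nat) (cs : List Char) (ans : Int) : Int :=
  match fuel, cs with
  | _, [] => ans
  | 0, _ => ans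
  | fuel + 1, c :: t =>
    let r := takeRun c t
    let base : Int := if c = 'd' then 10 else 26
    altGo fuel r.2
      (PySem.Int.mod (PySem.Int.mod (ans * base) 1000000009 *
        PySem.Int.powMod (base - 1) r.1 1000000009) 1000000009)

def solution_alt (s : String) : Int := altGo s.toList.length s.toList 1

-- ===== PRECONDITION & SPEC =====
-- Pre_ excludes only the empty string, on which A's s[0] raises IndexError.
def Pre_solution (s : String) : Prop := s ≠ ""
instance (s : String) : Decidable (Pre_solution s) := by unfold Pre_solution; infer_instance
def pvWitness_solution : String := "ddab"

def Spec_solution (s : String) (out : Int) : Prop := out = solution_alt s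
instance (s : String) (out : Int) : Decidable (Spec_solution s out) := by unfold Spec_solution; infer_instance

-- ===== CLAIM (what is proved, stated in full; the proofs are below) =====
def Claim_equal_solution : Prop := ∀ (s : String), Dom_solution s → Pre_solution s → Spec_solution s (solution s)

-- ===== LEMMAS AND PROOFS =====

def baseOf (c : Char) : Int := if c = 'd' then 10 else 26

def fA (p c : Char) : Int := if p = c then baseOf c - 1 else baseOf c

-- pure (un-reduced) product of A's per-pair factors
def P (p : Char) : List Char → Int
  | [] => 1
  | c :: t => fA p c * P c t

theorem takeRun_snd_length_le (c : Char) : ∀ t : List Char, (takeRun c t).2.length ≤ t.length := by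
  intro t
  induction t with
  | nil => simp [takeRun]
  | cons x t ih =>
      by_cases h : x = c
      · simp only [takeRun, if_pos h]
        exact le_trans ih (by simp)
      · simp [takeRun, h]

theorem P_append (x : Char) : ∀ (t : List Char) (p : Char),
    P p (t ++ [x]) = P p t * fA (t.getLastD p) x := by
  intro t
  induction t with
  | nil => intro p; simp [P]
  | cons c t ih =>
      intro p
      simp only [List.cons_append, P, ih c, List.getLastD_cons]
      ring

theorem pvM_pos : (0 : Int) < 1000000009 := by norm_num

-- modular arithmetic helpers
theorem emod_mul_left (x y : Int) :
    (x % 1000000009 * y) % 1000000009 = (x * y) % 1000000009 := by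
  rw [Int.mul_emod, Int.emod_emod_of_dvd _ dvd_rfl, ← Int.mul_emod]

theorem emod_mul3 (a b q : Int) :
    (a % 1000000009 * (b % 1000000009) * q) % 1000000009 = (a * b * q) % 1000000009 := by
  conv_lhs => rw [Int.mul_emod, ← Int.mul_emod a b]
  conv_rhs => rw [Int.mul_emod]

-- A's step factor is fA
theorem step_factor (p c : Char) :
    (if p = c then (if c = 'd' then (9 : Int) else 25) else (if c = 'd' then 10 else 26)) = fA p c := by
  unfold fA baseOf
  by_cases h : p = c <;> by_cases h2 : c = 'd' <;> simp [h, h2]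

theorem pyGetD_append_lt (l m : List Char) (i : Int) (d : Char) (h0 : 0 ≤ i) (h : i < l.length) :
    PySem.List.pyGetD (l ++ m) i d = PySem.List.pyGetD l i d := by
  rw [PySem.List.pyGetD_eq_getElem (l ++ m) d h0 (by simp; omega),
      PySem.List.pyGetD_eq_getElem l d h0 h]
  exact List.getElem_append_left (by omega)

theorem getElem_last_cons (t : List Char) : ∀ (c0 : Char) (h : t.length < (c0 :: t).length),
    (c0 :: t)[t.length]'h = t.getLastD c0 := by
  induction t with
  | nil => intro c0 h; simp
  | cons x t ih =>
      intro c0 h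
      rw [List.getLastD_cons]
      have h2 : (x :: t).length = t.length + 1 := rfl
      simp only [h2, List.getElem_cons_succ]
      exact ih x (by simp)

-- ======== A side: the indexed fold equals (baseOf c0 * P c0 rest) % 1000000009 ========
theorem foldA_char (c0 : Char) : ∀ (rest : List Char),
    (PySem.List.pyRange 1 (((c0 :: rest).length : Nat) : Int) 1).foldl
      (fun ans i =>
        PySem.Int.mod (ans * (if PySem.List.pyGetD (c0 :: rest) (i - 1) ' ' = PySem.List.pyGetD (c0 :: rest) i ' '
          then (if PySem.List.pyGetD (c0 :: rest) i ' ' = 'd' then (9 : Int) else 25)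
          else (if PySem.List.pyGetD (c0 :: rest) i ' ' = 'd' then 10 else 26))) 1000000009)
      (if c0 = 'd' then 10 else 26)
    = PySem.Int.mod (baseOf c0 * P c0 rest) 1000000009 := by
  intro rest
  induction rest using List.reverseRecOn with
  | nil =>
      rw [show (((c0 :: ([] : List Char)).length : Nat) : Int) = 1 by simp,
          PySem.List.pyRange_one_eq_nil le_rfl]
      by_cases h : c0 = 'd' <;>
        simp [h, P, baseOf]
  | append_singleton t x ih =>
      have hlen : (((c0 :: (t ++ [x])).length : Nat) : Int) = ((c0 :: t).length : Int) + 1 := by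
        simp
      have hsplit : (c0 :: (t ++ [x])) = (c0 :: t) ++ [x] := by simp
      rw [hlen, PySem.List.pyRange_one_succ_right (by simp), List.foldl_append]
      have hpref :
          (PySem.List.pyRange 1 ((c0 :: t).length : Int) 1).foldl
            (fun ans i =>
              PySem.Int.mod (ans * (if PySem.List.pyGetD (c0 :: (t ++ [x])) (i - 1) ' ' = PySem.List.pyGetD (c0 :: (t ++ [x])) i ' '
                then (if PySem.List.pyGetD (c0 :: (t ++ [x])) i ' ' = 'd' then (9 : Int) else 25)
                else (if PySem.List.pyGetD (c0 :: (t ++ [x])) i ' ' = 'd' then 10 else 26))) 1000000009)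
            (if c0 = 'd' then 10 else 26)
          = PySem.Int.mod (baseOf c0 * P c0 t) 1000000009 := by
        rw [← ih]
        apply PySem.List.foldl_congr_mem
        intro acc i hi
        rw [PySem.List.mem_pyRange_one] at hi
        obtain ⟨hi1, hi2⟩ := hi
        have hi2' : i < (t.length : Int) + 1 := by simpa using hi2
        rw [hsplit, pyGetD_append_lt _ _ _ _ (by omega) (by simp only [List.length_cons]; push_cast; omega),
            pyGetD_append_lt _ _ _ _ (by omega) (by simp only [List.length_cons]; push_cast; omega)]
      rw [hpref]
      simp only [List.foldl_cons, List.foldl_nil]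
      have hcrt : PySem.List.pyGetD (c0 :: (t ++ [x])) (((c0 :: t).length : Nat) : Int) ' ' = x := by
        rw [hsplit, PySem.List.pyGetD_eq_getElem _ _ (by positivity) (by simp)]
        simp
      have hprev : PySem.List.pyGetD (c0 :: (t ++ [x])) ((((c0 :: t).length : Nat) : Int) - 1) ' ' = t.getLastD c0 := by
        rw [hsplit, pyGetD_append_lt _ _ _ _ (by simp) (by simp),
            PySem.List.pyGetD_eq_getElem _ _ (by simp) (by simp)]
        have h3 : ((((c0 :: t).length : Nat) : Int) - 1).toNat = t.length := by simp
        simp only [h3]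
        exact getElem_last_cons t c0 (by simp)
      rw [hcrt, hprev, step_factor,
          PySem.Int.mod_eq_emod_of_pos pvM_pos, PySem.Int.mod_eq_emod_of_pos pvM_pos,
          PySem.Int.mod_eq_emod_of_pos pvM_pos, emod_mul_left, P_append, ← mul_assoc]

theorem solution_char (c0 : Char) (rest : List Char) (s : String) (hs : s.toList = c0 :: rest) :
    solution s = PySem.Int.mod (baseOf c0 * P c0 rest) 1000000009 := by
  unfold solution
  rw [hs]
  have h0 : PySem.List.pyGetD (c0 :: rest) 0 ' ' = c0 := by
    simp [PySem.List.pyGetD_zero_cons]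
  simp only [h0]
  exact foldA_char c0 rest

-- ======== B side ========
theorem P_takeRun (c : Char) : ∀ (t : List Char),
    P c t = (baseOf c - 1) ^ (takeRun c t).1 *
      (match (takeRun c t).2 with
       | [] => 1
       | c' :: t' => baseOf c' * P c' t') := by
  intro t
  induction t with
  | nil => simp [takeRun, P]
  | cons x t ih =>
      by_cases h : x = c
      · subst h
        have h1 : takeRun x (x :: t) = ((takeRun x t).1 + 1, (takeRun x t).2) := by
          simp [takeRun]
        rw [h1]
        show fA x x * P x t = _
        rw [ih, fA, if_pos rfl, pow_succ]
        ring
      · have h1 : takeRun c (x :: t) = (0, x :: t) := by simp [takeRun, h]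
        rw [h1]
        show fA c x * P x t = _
        rw [fA, if_neg (fun hc => h hc.symm)]
        simp

theorem altGo_eq : ∀ (fuel : Nat) (cs : List Char) (ans : Int), cs.length ≤ fuel →
    0 ≤ ans → ans < 1000000009 →
    altGo fuel cs ans = PySem.Int.mod (ans *
      (match cs with
       | [] => 1
       | c :: t => baseOf c * P c t)) 1000000009 := by
  intro fuel
  induction fuel with
  | zero =>
      intro cs ans hlen h0 h1
      have : cs = [] := by cases cs <;> simp_all
      subst this
      simp [altGo, Int.emod_eq_of_lt h0 h1]
  | succ fuel ih =>
      intro cs ans hlen h0 h1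
      cases cs with
      | nil => simp [altGo, Int.emod_eq_of_lt h0 h1]
      | cons c t =>
          show altGo fuel (takeRun c t).2 _ = _
          have hb : (if c = 'd' then (10 : Int) else 26) = baseOf c := rfl
          set ans' := PySem.Int.mod (PySem.Int.mod (ans * (if c = 'd' then (10 : Int) else 26)) 1000000009 *
            PySem.Int.powMod ((if c = 'd' then (10 : Int) else 26) - 1) (takeRun c t).1 1000000009) 1000000009 with hans'
          have hrw : ans' = (ans * baseOf c % 1000000009 * ((baseOf c - 1) ^ (takeRun c t).1 % 1000000009)) % 1000000009 := by
            rw [hans', hb, PySem.Int.mod_eq_emod_of_pos pvM_pos,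
                PySem.Int.mod_eq_emod_of_pos pvM_pos,
                PySem.Int.powMod_eq_emod _ _ pvM_pos]
          rw [ih (takeRun c t).2 ans'
              (le_trans (takeRun_snd_length_le c t) (by simpa using hlen))
              (by rw [hrw]; exact Int.emod_nonneg _ (by norm_num))
              (by rw [hrw]; exact Int.emod_lt_of_pos _ pvM_pos)]
          rw [PySem.Int.mod_eq_emod_of_pos pvM_pos, PySem.Int.mod_eq_emod_of_pos pvM_pos, hrw,
              emod_mul_left, emod_mul3]
          have hQ : (match c :: t with | [] => (1 : Int) | c' :: t' => baseOf c' * P c' t') = baseOf c * P c t := rfl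
          rw [hQ, P_takeRun c t]
          ring_nf

-- ===== VERDICT (by name: the statement is the Claim_ definition above) =====
theorem solution_spec : Claim_equal_solution := by
  intro s _ hpre
  unfold Spec_solution
  obtain ⟨c0, rest, hs⟩ : ∃ c0 rest, s.toList = c0 :: rest := by
    cases h : s.toList with
    | nil => exact absurd (String.toList_eq_nil_iff.mp h) hpre
    | cons c t => exact ⟨c, t, rfl⟩
  rw [solution_char c0 rest s hs]
  unfold solution_alt
  rw [hs, altGo_eq (c0 :: rest).length (c0 :: rest) 1 le_rfl (by norm_num) (by norm_num)]
  simp
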